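-- pv_equiv track=rewrite | github.com/yiye3/ICLEval | code/generate_data/learning_ability/generate_format_conversion.py | get_CSV
-- ===== SOURCE A (Python) =====
-- def get_CSV(infos):
--     table_title = {}
--     table_content = {}
--     for info in infos:
--         info_type, info_content = info
--         keys = info_content.keys()
--         if info_type not in table_title:
--             title = "Index," + ",".join(keys) + "\n"
--             table_title[info_type] = title
--         if info_type not in table_content:
--             table_content[info_type] = []
--
--         content = "{},".format(len(table_content[info_type]) + 1)
--         for k in keys:
--             content += "{},".format(info_content[k])
--         content = content[:-1] + "\n"
--         table_content[info_type].append(content)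
--
--     res = ""
--     for k in table_title.keys():
--         res += table_title[k]
--         for line in table_content[k]:
--             res += line
--         res += "\n"
--     return res
-- ===== SOURCE B (Python) =====
-- def get_CSV(infos):
--     # Per-type filtering passes instead of A's single pass over two parallel dicts:
--     # first collect the distinct types in first-occurrence order (no dict), then for
--     # each type rescan infos to pull its rows, take the title from the first row's
--     # keys, and number rows with enumerate(start=1); join all parts once.
--     types = []
--     for t, _ in infos:
--         if t not in types:
--             types.append(t)
--     out = []
--     for t in types:
--         rows = [c for t2, c in infos if t2 == t]
--         out.append("Index," + ",".join(rows[0].keys()) + "\n")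
--         for i, row in enumerate(rows, 1):
--             out.append(",".join([str(i)] + [row[k] for k in row.keys()]) + "\n")
--         out.append("\n")
--     return "".join(out)
-- ===== Notes on version B (the rewrite author's own statement) =====
-- stated objective: alternative
-- what changed: B drops A's dict-based single grouping pass entirely: it first collects the distinct types in first-occurrence order with a list-membership scan, then for each type rescans infos with a filter to gather that type's rows, taking the title from the first row and numbering rows with enumerate(start=1), joining all parts once.
import Mathlib
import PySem

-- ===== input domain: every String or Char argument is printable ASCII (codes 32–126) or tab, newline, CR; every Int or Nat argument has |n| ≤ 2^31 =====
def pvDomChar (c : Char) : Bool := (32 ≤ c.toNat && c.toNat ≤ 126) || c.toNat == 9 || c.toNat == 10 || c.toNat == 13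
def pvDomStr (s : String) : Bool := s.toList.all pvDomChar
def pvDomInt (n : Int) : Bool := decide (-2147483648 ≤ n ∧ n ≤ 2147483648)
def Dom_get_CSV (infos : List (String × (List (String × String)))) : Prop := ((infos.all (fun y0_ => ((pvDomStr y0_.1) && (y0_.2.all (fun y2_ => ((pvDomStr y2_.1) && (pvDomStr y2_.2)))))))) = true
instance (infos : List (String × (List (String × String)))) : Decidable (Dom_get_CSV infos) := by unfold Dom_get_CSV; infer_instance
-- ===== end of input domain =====

-- B drops A's dict-based single grouping pass: it dedups the types by list-membership, then
-- filters infos once per type — objective: alternative algorithm; return value proved equal.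

-- ===== PORT A =====
-- loop body of A's first 'for info in infos' loop, named for the proofs; a literal transliteration
def get_CSV_step (st : PySem.Dict String String × PySem.Dict String (List String))
    (info : String × (List (String × String))) :
    PySem.Dict String String × PySem.Dict String (List String) :=
  let table_title := st.1
  let table_content := st.2
  let info_type := info.1
  let info_content := PySem.Dict.ofList info.2   -- the Python dict the caller passed
  let keys := info_content.keys
  let table_title :=
    if table_title.contains info_type then table_title
    else table_title.insert info_type ("Index," ++ PySem.Str.join "," keys ++ "\n")
  let table_content :=
    if table_content.contains info_type then table_content
    else table_content.insert info_type []
  let content := PySem.Int.toStr (((table_content.getD info_type []).length : Int) + 1) ++ ","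
  let content := keys.foldl (fun c k => c ++ info_content.getD k "" ++ ",") content
  let content := PySem.Str.slice content none (some (-1)) ++ "\n"   -- content[:-1] + "\n"
  (table_title, table_content.modify info_type [] (fun lines => lines ++ [content]))

def get_CSV (infos : List (String × (List (String × String)))) : String :=
  let st := infos.foldl get_CSV_step (PySem.Dict.mk [], PySem.Dict.mk [])
  st.1.keys.foldl
    (fun res k =>
      let res := res ++ st.1.getD k ""
      let res := (st.2.getD k []).foldl (fun r line => r ++ line) res
      res ++ "\n")
    ""

-- ===== PORT B =====
-- B: distinct types in first-occurrence order (list membership, no dict), then one filter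
-- pass over infos per type; rows[0] is ported as headD — for every t in types rows is
-- nonempty by construction, so the Python rows[0] never raises and the default is unreachable.
def get_CSV_alt (infos : List (String × (List (String × String)))) : String :=
  let types := infos.foldl
    (fun ts (info : String × (List (String × String))) =>
      if ts.contains info.1 then ts else ts ++ [info.1]) []
  let out := types.foldl
    (fun out t =>
      let rows := (infos.filter (fun p => p.1 == t)).map (fun p => PySem.Dict.ofList p.2)
      ((out ++ ["Index," ++ PySem.Str.join "," (rows.headD (PySem.Dict.mk [])).keys ++ "\n"]) ++
        (PySem.List.enumerate rows 1).map (fun ir =>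
          PySem.Str.join ","
            (PySem.Int.toStr ir.1 :: ir.2.keys.map (fun k => ir.2.getD k "")) ++ "\n"))
      ++ ["\n"])
    []
  PySem.Str.join "" out

-- ===== PRECONDITION & SPEC =====
def Spec_get_CSV (infos : List (String × (List (String × String)))) (out : String) : Prop := out = get_CSV_alt infos
instance (infos : List (String × (List (String × String)))) (out : String) : Decidable (Spec_get_CSV infos out) := by unfold Spec_get_CSV; infer_instance

-- ===== CLAIM (what is proved, stated in full; the proofs are below) =====
def Claim_equal_get_CSV : Prop := ∀ (infos : List (String × (List (String × String)))), Dom_get_CSV infos → Spec_get_CSV infos (get_CSV infos)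

-- ===== LEMMAS AND PROOFS =====

-- abbreviations for the proof (never used by the ports)
abbrev pvE := String × String × List (PySem.Dict String String)

-- title A/B build on first occurrence of a type
def pvTitle (row : PySem.Dict String String) : String :=
  "Index," ++ PySem.Str.join "," row.keys ++ "\n"

-- one CSV line, B's shape
def pvLine (i : Int) (row : PySem.Dict String String) : String :=
  PySem.Str.join "," (PySem.Int.toStr i :: row.keys.map (fun k => row.getD k "")) ++ "\n"

def pvRender (rows : List (PySem.Dict String String)) : List String :=
  (PySem.List.enumerate rows 1).map (fun ir => pvLine ir.1 ir.2)

-- the abstract per-info step on the common grouped state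
def pvStep (L : List pvE) (t : String) (row : PySem.Dict String String) : List pvE :=
  if L.any (fun e => e.1 == t) then
    L.map (fun e => if e.1 == t then (e.1, e.2.1, e.2.2 ++ [row]) else e)
  else L ++ [(t, pvTitle row, [row])]

def pvFold (infos : List (String × (List (String × String)))) (L : List pvE) : List pvE :=
  infos.foldl (fun L info => pvStep L info.1 (PySem.Dict.ofList info.2)) L

-- projections of the grouped state to each of A's dicts
def pvTT (L : List pvE) : PySem.Dict String String := PySem.Dict.mk (L.map (fun e => (e.1, e.2.1)))
def pvTC (L : List pvE) : PySem.Dict String (List String) := PySem.Dict.mk (L.map (fun e => (e.1, pvRender e.2.2)))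

def pvEmit (e : pvE) : List Char :=
  e.2.1.toList ++ (pvRender e.2.2).flatMap String.toList ++ ['\n']

def pvKeys (L : List pvE) : List String := L.map (fun e => e.1)

-- B-side abstractions: rows of one type, and the first-occurrence grouping built by filtering
def pvRowsOf (infos : List (String × (List (String × String)))) (t : String) :
    List (PySem.Dict String String) :=
  (infos.filter (fun p => p.1 == t)).map (fun p => PySem.Dict.ofList p.2)

def pvFresh : List (String × (List (String × String))) → List String → List pvE
  | [], _ => []
  | (t, c) :: rest, seen =>
      if seen.contains t then pvFresh rest seen
      else (t, pvTitle (PySem.Dict.ofList c), PySem.Dict.ofList c :: pvRowsOf rest t)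
            :: pvFresh rest (seen ++ [t])

-- -------- generic small lemmas --------

theorem pv_str_ext (s t : String) (h : s.toList = t.toList) : s = t := by
  have := congrArg String.ofList h; simpa using this

theorem pv_slice_neg_one {α : Type} (xs : List α) :
    PySem.List.slice xs none (some (-1)) = xs.dropLast := by
  rcases xs with _ | ⟨x, t⟩
  · rfl
  · have hc : PySem.List.clampIdx (x :: t).length (-1) = t.length := by
      unfold PySem.List.clampIdx
      rw [if_pos (by omega), if_neg (by simp)]
      simp
    simp [PySem.List.slice, List.dropLast_eq_take]

theorem pv_intercalate_comma (vs : List (List Char)) (p : List Char) :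
    [','].intercalate (p :: vs) = p ++ vs.flatMap (fun v => ',' :: v) := by
  induction vs generalizing p with
  | nil => simp [List.intercalate]
  | cons v vs ih => simp [List.intercalate, List.intersperse] at *; simp [ih]

theorem pv_intercalate_nil (l : List (List Char)) :
    ([] : List Char).intercalate l = l.flatten := by
  induction l with
  | nil => simp [List.intercalate]
  | cons x l ih => cases l <;> simp_all [List.intercalate, List.intersperse]

theorem pv_foldkeys (ks : List String) (g : String → String) (c : String) :
    (ks.foldl (fun c k => c ++ g k ++ ",") c).toList
      = c.toList ++ ks.flatMap (fun k => (g k).toList ++ [',']) := by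
  induction ks generalizing c with
  | nil => simp
  | cons k ks ih => simp [ih]

theorem pv_shift (ks : List String) (g : String → String) :
    [','] ++ ks.flatMap (fun k => (g k).toList ++ [','])
      = ks.flatMap (fun k => ',' :: (g k).toList) ++ [','] := by
  induction ks with
  | nil => simp
  | cons k ks ih => simp at *; exact ih

theorem pv_enumerate_append {α : Type} (xs : List α) (y : α) (s : Int) :
    PySem.List.enumerate (xs ++ [y]) s = PySem.List.enumerate xs s ++ [(s + xs.length, y)] := by
  induction xs generalizing s with
  | nil => simp [PySem.List.enumerate]
  | cons x xs ih =>
      rw [List.cons_append, PySem.List.enumerate_cons, ih, PySem.List.enumerate_cons]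
      simp; ring_nf

theorem pv_render_append (rows : List (PySem.Dict String String)) (row : PySem.Dict String String) :
    pvRender (rows ++ [row]) = pvRender rows ++ [pvLine ((rows.length : Int) + 1) row] := by
  unfold pvRender
  rw [pv_enumerate_append]
  simp [add_comm]

theorem pv_render_length (rows : List (PySem.Dict String String)) :
    (pvRender rows).length = rows.length := by
  simp [pvRender, PySem.List.length_enumerate]

theorem pv_line_eq (row : PySem.Dict String String) (i : Int) :
    PySem.Str.slice (row.keys.foldl (fun c k => c ++ row.getD k "" ++ ",")
        (PySem.Int.toStr i ++ ",")) none (some (-1)) ++ "\n" = pvLine i row := by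
  apply pv_str_ext
  simp only [pvLine, String.toList_append, PySem.Str.slice, PySem.Chars.slice,
    String.toList_ofList, PySem.Str.toList_join, PySem.Chars.join]
  rw [pv_slice_neg_one, pv_foldkeys row.keys (fun k => row.getD k "")]
  rw [show (",").toList = [','] from by decide]
  rw [show ("\n").toList = ['\n'] from by decide]
  simp only [String.toList_append]
  rw [show (",").toList = [','] from by decide]
  rw [List.map_cons, List.map_map, pv_intercalate_comma]
  rw [List.append_assoc, pv_shift row.keys (fun k => row.getD k "")]
  rw [← List.append_assoc, List.dropLast_concat]
  simp [List.flatMap_def, List.map_map, Function.comp_def]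

-- -------- association-list facts about PySem.Dict under nodup keys --------

theorem pv_find_map {β : Type} (L : List pvE) (f : pvE → String × β)
    (hf : ∀ e, (f e).1 = e.1) (hnd : (pvKeys L).Nodup)
    (e : pvE) (he : e ∈ L) (t : String) (ht : e.1 = t) :
    (L.map f).find? (fun p => p.1 == t) = some (f e) := by
  induction L with
  | nil => simp at he
  | cons e' L ih =>
      have hnd' := List.nodup_cons.mp (show (e'.1 :: pvKeys L).Nodup from hnd)
      rcases List.mem_cons.mp he with he | he
      · subst he
        simp [hf, ht]
      · have h1 : e'.1 ≠ t := by
          intro hcc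
          have : e'.1 ∈ pvKeys L := by
            rw [hcc, ← ht]; exact List.mem_map_of_mem he
          exact hnd'.1 this
        simp only [List.map_cons, List.find?]
        rw [show ((f e').1 == t) = false from beq_eq_false_iff_ne.mpr (by rw [hf]; exact h1)]
        exact ih hnd'.2 he

theorem pv_contains_map {β : Type} (L : List pvE) (f : pvE → String × β)
    (hf : ∀ e, (f e).1 = e.1) (t : String) :
    (PySem.Dict.mk (L.map f)).contains t = L.any (fun e => e.1 == t) := by
  simp only [PySem.Dict.contains, List.any_map]
  congr 1
  funext e
  simp [hf]

theorem pv_insert_new {κ ν : Type} [BEq κ] (d : PySem.Dict κ ν) (k : κ) (v : ν)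
    (h : d.contains k = false) : d.insert k v = PySem.Dict.mk (d.items ++ [(k, v)]) := by
  simp [PySem.Dict.insert, h]

theorem pv_insert_over {κ ν : Type} [BEq κ] (d : PySem.Dict κ ν) (k : κ) (v : ν)
    (h : d.contains k = true) :
    d.insert k v = PySem.Dict.mk (d.items.map (fun p => if p.1 == k then (k, v) else p)) := by
  simp [PySem.Dict.insert, h]

theorem pv_getD_map {β : Type} (L : List pvE) (f : pvE → String × β)
    (hf : ∀ e, (f e).1 = e.1) (hnd : (pvKeys L).Nodup)
    (e : pvE) (he : e ∈ L) (t : String) (ht : e.1 = t) (d : β) :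
    (PySem.Dict.mk (L.map f)).getD t d = (f e).2 := by
  simp [PySem.Dict.getD, PySem.Dict.get?, pv_find_map L f hf hnd e he t ht]

theorem pv_find_map_none {β : Type} (L : List pvE) (f : pvE → String × β)
    (hf : ∀ e, (f e).1 = e.1) (t : String) (hc : L.any (fun e => e.1 == t) = false) :
    (L.map f).find? (fun p => p.1 == t) = none := by
  rw [List.find?_eq_none]
  intro p hp
  rcases List.mem_map.mp hp with ⟨e, he, rfl⟩
  rw [List.any_eq_false] at hc
  have := hc e he
  simp [beq_iff_eq] at this ⊢
  rw [hf]; exact this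

theorem pv_getD_cons_ne {β : Type} (p : String × β) (items : List (String × β)) (d : β)
    (k : String) (h : p.1 ≠ k) :
    (PySem.Dict.mk (p :: items)).getD k d = (PySem.Dict.mk items).getD k d := by
  simp [PySem.Dict.getD, PySem.Dict.get?, List.find?]
  rw [show (p.1 == k) = false from beq_eq_false_iff_ne.mpr h]

theorem pv_keys_step (L : List pvE) (t : String) (row : PySem.Dict String String) :
    pvKeys (pvStep L t row)
      = if L.any (fun e => e.1 == t) then pvKeys L else pvKeys L ++ [t] := by
  unfold pvStep
  split
  · simp only [pvKeys, List.map_map]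
    apply List.map_congr_left
    intro e _
    by_cases h : (e.1 == t) = true
    · rw [Function.comp_apply, if_pos h]
    · rw [Function.comp_apply, if_neg h]
  · simp [pvKeys]

theorem pv_step_nodup (L : List pvE) (t : String) (row : PySem.Dict String String)
    (h : (pvKeys L).Nodup) : (pvKeys (pvStep L t row)).Nodup := by
  rw [pv_keys_step]
  by_cases hc : L.any (fun e => e.1 == t) = true
  · simp [hc, h]
  · rw [if_neg hc]
    rw [List.nodup_append]
    refine ⟨h, List.nodup_singleton t, ?_⟩
    intro k hk b hb
    rw [List.mem_singleton] at hb
    subst hb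
    rw [Bool.not_eq_true, List.any_eq_false] at hc
    rcases List.mem_map.mp hk with ⟨e, he, rfl⟩
    have := hc e he
    simpa using this

theorem pv_fold_nodup (infos : List (String × (List (String × String)))) (L : List pvE)
    (h : (pvKeys L).Nodup) : (pvKeys (pvFold infos L)).Nodup := by
  induction infos generalizing L with
  | nil => simpa [pvFold] using h
  | cons info infos ih =>
      have : pvFold (info :: infos) L
          = pvFold infos (pvStep L info.1 (PySem.Dict.ofList info.2)) := by
        simp [pvFold]
      rw [this]
      exact ih _ (pv_step_nodup _ _ _ h)

-- -------- A's port tracks pvStep --------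

theorem pv_stepA (L : List pvE) (info : String × (List (String × String)))
    (h : (pvKeys L).Nodup) :
    get_CSV_step (pvTT L, pvTC L) info =
      (pvTT (pvStep L info.1 (PySem.Dict.ofList info.2)),
       pvTC (pvStep L info.1 (PySem.Dict.ofList info.2))) := by
  rcases info with ⟨t, ic⟩
  simp only [get_CSV_step, pvStep]
  have hTT : (pvTT L).contains t = L.any (fun e => e.1 == t) := by
    rw [show pvTT L = PySem.Dict.mk (L.map (fun e => (e.1, e.2.1))) from rfl]
    exact pv_contains_map L (fun e => (e.1, e.2.1)) (fun _ => rfl) t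
  have hTC : (pvTC L).contains t = L.any (fun e => e.1 == t) := by
    rw [show pvTC L = PySem.Dict.mk (L.map (fun e => (e.1, pvRender e.2.2))) from rfl]
    exact pv_contains_map L (fun e => (e.1, pvRender e.2.2)) (fun _ => rfl) t
  set row := PySem.Dict.ofList ic
  by_cases hc : L.any (fun e => e.1 == t) = true
  · rw [hTT, hTC, if_pos hc, if_pos hc, if_pos hc]
    obtain ⟨e0, he0, ht0⟩ := List.any_eq_true.mp hc
    have ht0' : e0.1 = t := by simpa using ht0
    have hget : (pvTC L).getD t [] = pvRender e0.2.2 := by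
      rw [show pvTC L = PySem.Dict.mk (L.map (fun e => (e.1, pvRender e.2.2))) from rfl]
      exact pv_getD_map L (fun e => (e.1, pvRender e.2.2)) (fun _ => rfl) h e0 he0 t ht0' []
    simp only [Prod.mk.injEq]
    refine ⟨?_, ?_⟩
    · -- titles unchanged
      simp only [pvTT, List.map_map]
      congr 1
      apply List.map_congr_left
      intro e _
      by_cases hbe : (e.1 == t) = true
      · have hbe' : e.1 = t := by simpa using hbe
        simp [hbe']
      · have hbe' : e.1 ≠ t := by simpa using hbe
        simp [hbe']
    · -- contents
      rw [hget, pv_line_eq row (((pvRender e0.2.2).length : Int) + 1)]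
      simp only [PySem.Dict.modify]
      rw [hget]
      rw [pv_insert_over _ _ _ (by rw [hTC]; exact hc)]
      rw [show (pvTC L).items = L.map (fun e => (e.1, pvRender e.2.2)) from rfl]
      simp only [pvTC, List.map_map]
      congr 1
      apply List.map_congr_left
      intro e he
      by_cases hbe : (e.1 == t) = true
      · have hbe' : e.1 = t := by simpa using hbe
        have hgete : (pvTC L).getD t [] = pvRender e.2.2 := by
          rw [show pvTC L = PySem.Dict.mk (L.map (fun e => (e.1, pvRender e.2.2))) from rfl]
          exact pv_getD_map L (fun e => (e.1, pvRender e.2.2)) (fun _ => rfl) h e he t hbe' []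
        have heq : pvRender e0.2.2 = pvRender e.2.2 := by rw [← hget, hgete]
        have hlen : e0.2.2.length = e.2.2.length := by
          have := congrArg List.length heq
          simpa [pv_render_length] using this
        simp only [Function.comp_apply, hbe', if_pos, beq_self_eq_true]
        simp [heq, pv_render_length, pv_render_append]
      · have hbe' : e.1 ≠ t := by simpa using hbe
        simp [hbe']
  · rw [Bool.not_eq_true] at hc
    rw [hTT, hTC, if_neg (by simp [hc]), if_neg (by simp [hc]), if_neg (by simp [hc])]
    have hfind := pv_find_map_none L (fun e => (e.1, pvRender e.2.2)) (fun _ => rfl) t hc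
    have hget0 : (PySem.Dict.mk ((pvTC L).items ++ [(t, ([] : List String))])).getD t [] = [] := by
      simp only [PySem.Dict.getD, PySem.Dict.get?, List.find?_append]
      rw [show (pvTC L).items = L.map (fun e => (e.1, pvRender e.2.2)) from rfl, hfind]
      simp [List.find?]
    rw [pv_insert_new _ _ _ (by rw [hTT]; exact hc), pv_insert_new _ _ _ (by rw [hTC]; exact hc)]
    simp only [Prod.mk.injEq]
    refine ⟨?_, ?_⟩
    · -- titles
      simp [pvTT, pvTitle]
    · -- contents
      rw [hget0]
      rw [pv_line_eq row ((([] : List String).length : Int) + 1)]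
      simp only [PySem.Dict.modify, hget0]
      have hcontains : (PySem.Dict.mk ((pvTC L).items ++ [(t, ([] : List String))])).contains t = true := by
        simp [PySem.Dict.contains]
      rw [pv_insert_over _ _ _ hcontains]
      rw [show (pvTC L).items = L.map (fun e => (e.1, pvRender e.2.2)) from rfl]
      simp only [pvTC, List.map_append, List.map_map]
      congr 1
      refine congrArg₂ (· ++ · : List (String × List String) → List (String × List String) → List (String × List String)) ?_ ?_
      · apply List.map_congr_left
        intro e he
        rw [List.any_eq_false] at hc
        have hne : (e.1 == t) = false := by simpa using hc e he
        have hne' : e.1 ≠ t := by simpa using hne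
        simp [hne']
      · simp [pvRender, PySem.List.enumerate_cons, PySem.List.enumerate_nil, pvLine]

theorem pv_foldA (infos : List (String × (List (String × String)))) (L : List pvE)
    (h : (pvKeys L).Nodup) :
    infos.foldl get_CSV_step (pvTT L, pvTC L)
      = (pvTT (pvFold infos L), pvTC (pvFold infos L)) := by
  induction infos generalizing L with
  | nil => simp [pvFold]
  | cons info infos ih =>
      rw [List.foldl_cons, pv_stepA L info h,
        ih _ (pv_step_nodup _ _ _ h)]
      simp [pvFold]

-- -------- pvFold characterised by filtering (B's shape) --------

theorem pv_any_contains (L : List pvE) (t : String) :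
    L.any (fun e => e.1 == t) = (pvKeys L).contains t := by
  induction L with
  | nil => rfl
  | cons e L ih =>
      simp only [List.any_cons, pvKeys, List.map_cons, List.contains_cons] at *
      rw [ih]
      cases hbe : (e.1 == t)
      · have : (t == e.1) = false := by
          simp at hbe ⊢; exact fun hh => hbe hh.symm
        simp [this]
      · have : (t == e.1) = true := by
          simp at hbe ⊢; exact hbe.symm
        simp [this]

theorem pvFresh_cons (t : String) (c : List (String × String))
    (rest : List (String × (List (String × String)))) (seen : List String) :
    pvFresh ((t, c) :: rest) seen
      = if seen.contains t = true then pvFresh rest seen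
        else (t, pvTitle (PySem.Dict.ofList c), PySem.Dict.ofList c :: pvRowsOf rest t)
              :: pvFresh rest (seen ++ [t]) := rfl

theorem pv_contains_false {ts : List String} {t : String} (hc : ts.contains t = false) :
    t ∉ ts := by simpa using hc

theorem pv_rowsOf_cons_ne (t : String) (c : List (String × String))
    (rest : List (String × (List (String × String)))) (u : String) (h : t ≠ u) :
    pvRowsOf ((t, c) :: rest) u = pvRowsOf rest u := by
  simp only [pvRowsOf, List.filter_cons]
  rw [show (((t, c) : String × (List (String × String))).1 == u) = false from
    beq_eq_false_iff_ne.mpr h]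
  simp

theorem pv_rowsOf_cons_eq (t : String) (c : List (String × String))
    (rest : List (String × (List (String × String)))) :
    pvRowsOf ((t, c) :: rest) t = PySem.Dict.ofList c :: pvRowsOf rest t := by
  simp [pvRowsOf]

theorem pv_fold_char (infos : List (String × (List (String × String)))) (L : List pvE) :
    pvFold infos L
      = L.map (fun e => (e.1, e.2.1, e.2.2 ++ pvRowsOf infos e.1)) ++ pvFresh infos (pvKeys L) := by
  induction infos generalizing L with
  | nil =>
      simp [pvFold, pvFresh, pvRowsOf]
  | cons info rest ih =>
      rcases info with ⟨t, c⟩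
      have hstep : pvFold ((t, c) :: rest) L
          = pvFold rest (pvStep L t (PySem.Dict.ofList c)) := by simp [pvFold]
      rw [hstep, ih]
      by_cases hc : L.any (fun e => e.1 == t) = true
      · have hcont : (pvKeys L).contains t = true := by rw [← pv_any_contains]; exact hc
        have hkeys : pvKeys (pvStep L t (PySem.Dict.ofList c)) = pvKeys L := by
          rw [pv_keys_step, if_pos hc]
        rw [hkeys]
        have hfresh : pvFresh ((t, c) :: rest) (pvKeys L) = pvFresh rest (pvKeys L) := by
          rw [pvFresh_cons, if_pos hcont]
        rw [hfresh]
        congr 1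
        unfold pvStep
        rw [if_pos hc, List.map_map]
        apply List.map_congr_left
        intro e _
        by_cases hbe : (e.1 == t) = true
        · have hbe' : e.1 = t := by simpa using hbe
          simp only [Function.comp_apply, if_pos hbe]
          rw [hbe', pv_rowsOf_cons_eq]
          simp
        · have hbe' : e.1 ≠ t := by simpa using hbe
          simp only [Function.comp_apply, if_neg hbe]
          rw [pv_rowsOf_cons_ne t c rest e.1 (fun hh => hbe' hh.symm)]
      · rw [Bool.not_eq_true] at hc
        have hcont : (pvKeys L).contains t = false := by rw [← pv_any_contains]; exact hc
        have hkeys : pvKeys (pvStep L t (PySem.Dict.ofList c)) = pvKeys L ++ [t] := by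
          rw [pv_keys_step, if_neg (by simp [hc])]
        rw [hkeys]
        have hfresh : pvFresh ((t, c) :: rest) (pvKeys L)
            = (t, pvTitle (PySem.Dict.ofList c),
                PySem.Dict.ofList c :: pvRowsOf rest t) :: pvFresh rest (pvKeys L ++ [t]) := by
          rw [pvFresh_cons, if_neg (by simpa using pv_contains_false hcont)]
        rw [hfresh]
        unfold pvStep
        rw [if_neg (by simp [hc]), List.map_append]
        rw [List.map_singleton]
        have hmap : L.map (fun e => (e.1, e.2.1, e.2.2 ++ pvRowsOf rest e.1))
            = L.map (fun e => (e.1, e.2.1, e.2.2 ++ pvRowsOf ((t, c) :: rest) e.1)) := by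
          apply List.map_congr_left
          intro e he
          rw [List.any_eq_false] at hc
          have hne : e.1 ≠ t := by simpa using hc e he
          rw [pv_rowsOf_cons_ne t c rest e.1 (fun hh => hne hh.symm)]
        rw [hmap]
        simp only [List.map_singleton, List.append_assoc, List.singleton_append]

-- -------- facts about pvFresh used for B's emit pass --------

theorem pv_types_fold (infos : List (String × (List (String × String)))) (ts : List String) :
    infos.foldl
      (fun ts (info : String × (List (String × String))) =>
        if ts.contains info.1 then ts else ts ++ [info.1]) ts
      = ts ++ pvKeys (pvFresh infos ts) := by
  induction infos generalizing ts with
  | nil => simp [pvFresh, pvKeys]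
  | cons info rest ih =>
      rcases info with ⟨t, c⟩
      rw [List.foldl_cons]
      by_cases hc : ts.contains t = true
      · rw [if_pos hc, ih, pvFresh_cons, if_pos hc]
      · rw [Bool.not_eq_true] at hc
        rw [if_neg (by simpa using pv_contains_false hc), ih, pvFresh_cons,
          if_neg (by simpa using pv_contains_false hc)]
        simp [pvKeys]

theorem pv_fresh_entry (infos : List (String × (List (String × String)))) (seen : List String)
    (e : pvE) (he : e ∈ pvFresh infos seen) :
    e.2.2 = pvRowsOf infos e.1 ∧
    e.2.1 = pvTitle (e.2.2.headD (PySem.Dict.mk [])) ∧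
    seen.contains e.1 = false := by
  induction infos generalizing seen with
  | nil => simp [pvFresh] at he
  | cons info rest ih =>
      rcases info with ⟨t, c⟩
      by_cases hc : seen.contains t = true
      · rw [pvFresh_cons, if_pos hc] at he
        obtain ⟨h1, h2, h3⟩ := ih seen he
        have hne : t ≠ e.1 := by
          intro hh; rw [← hh, hc] at h3; exact absurd h3 (by simp)
        exact ⟨by rw [pv_rowsOf_cons_ne t c rest e.1 hne]; exact h1, h2, h3⟩
      · rw [Bool.not_eq_true] at hc
        rw [pvFresh_cons, if_neg (by simpa using pv_contains_false hc)] at he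
        rcases List.mem_cons.mp he with rfl | he'
        · refine ⟨?_, by simp [List.headD], hc⟩
          simp [pv_rowsOf_cons_eq]
        · obtain ⟨h1, h2, h3⟩ := ih (seen ++ [t]) he'
          have hmem := pv_contains_false h3
          have h3a : seen.contains e.1 = false := by
            rw [Bool.eq_false_iff]
            intro hcc
            exact hmem (List.mem_append_left _ (by simpa using hcc))
          have hne : t ≠ e.1 := by
            intro hh
            exact hmem (List.mem_append_right _ (by simp [hh]))
          exact ⟨by rw [pv_rowsOf_cons_ne t c rest e.1 hne]; exact h1, h2, h3a⟩

-- -------- emit phases --------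

theorem pv_strcat_fold (xs : List String) (r : String) :
    (xs.foldl (fun a b => a ++ b) r).toList = r.toList ++ xs.flatMap String.toList := by
  induction xs generalizing r with
  | nil => simp
  | cons x xs ih => simp [ih]

theorem pv_TT_keys (L : List pvE) : (pvTT L).keys = pvKeys L := by
  simp [pvTT, PySem.Dict.keys, List.map_map, pvKeys, Function.comp]

theorem pv_emitA (L : List pvE) (r : String) (h : (pvKeys L).Nodup) :
    ((pvTT L).keys.foldl
      (fun res k =>
        ((pvTC L).getD k []).foldl (fun r line => r ++ line) (res ++ (pvTT L).getD k "") ++ "\n")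
      r).toList = r.toList ++ L.flatMap pvEmit := by
  induction L generalizing r with
  | nil => simp [pvTT, PySem.Dict.keys]
  | cons e L ih =>
      have hnd' := List.nodup_cons.mp (show (e.1 :: pvKeys L).Nodup from h)
      rw [pv_TT_keys]
      show ((e.1 :: pvKeys L).foldl _ r).toList = _
      rw [List.foldl_cons]
      have hstep : ∀ (acc : String), ∀ k ∈ pvKeys L,
          ((pvTC (e :: L)).getD k []).foldl (fun r line => r ++ line) (acc ++ (pvTT (e :: L)).getD k "") ++ "\n"
            = ((pvTC L).getD k []).foldl (fun r line => r ++ line) (acc ++ (pvTT L).getD k "") ++ "\n" := by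
        intro acc k hk
        have hne : e.1 ≠ k := by
          intro hcc; exact hnd'.1 (hcc ▸ hk)
        rw [show pvTT (e :: L) = PySem.Dict.mk ((e.1, e.2.1) :: (pvTT L).items) from rfl,
          show pvTC (e :: L) = PySem.Dict.mk ((e.1, pvRender e.2.2) :: (pvTC L).items) from rfl]
        rw [pv_getD_cons_ne (e.1, e.2.1) (pvTT L).items "" k hne,
          pv_getD_cons_ne (e.1, pvRender e.2.2) (pvTC L).items [] k hne]
      rw [PySem.List.foldl_congr_mem (pvKeys L) _ _ _ hstep]
      rw [← pv_TT_keys, ih _ hnd'.2]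
      have hgtt : (pvTT (e :: L)).getD e.1 "" = e.2.1 := by
        rw [show pvTT (e :: L) = PySem.Dict.mk ((e :: L).map (fun e => (e.1, e.2.1))) from rfl]
        exact pv_getD_map (e :: L) (fun e => (e.1, e.2.1)) (fun _ => rfl) h e (by simp) e.1 rfl ""
      have hgtc : (pvTC (e :: L)).getD e.1 [] = pvRender e.2.2 := by
        rw [show pvTC (e :: L) = PySem.Dict.mk ((e :: L).map (fun e => (e.1, pvRender e.2.2))) from rfl]
        exact pv_getD_map (e :: L) (fun e => (e.1, pvRender e.2.2)) (fun _ => rfl) h e (by simp) e.1 rfl []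
      rw [hgtt, hgtc]
      simp only [String.toList_append, pv_strcat_fold]
      rw [show ("\n").toList = ['\n'] from by decide]
      simp [pvEmit]

theorem pv_join_empty (parts : List String) :
    (PySem.Str.join "" parts).toList = parts.flatMap String.toList := by
  rw [PySem.Str.toList_join]
  rw [show ("").toList = ([] : List Char) from rfl]
  rw [PySem.Chars.join, pv_intercalate_nil]
  simp [List.flatMap_def]

theorem pv_blocks_emit (F : List pvE) :
    ((F.flatMap (fun e => e.2.1 :: (pvRender e.2.2 ++ ["\n"]))).flatMap String.toList)
      = F.flatMap pvEmit := by
  induction F with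
  | nil => simp
  | cons e F ih =>
      simp only [List.flatMap_cons, List.flatMap_append, ih]
      simp [pvEmit, show ("\n").toList = ['\n'] from by decide]

theorem pv_emitB (infos : List (String × (List (String × String)))) :
    (get_CSV_alt infos).toList = (pvFresh infos []).flatMap pvEmit := by
  simp only [get_CSV_alt]
  rw [pv_types_fold infos []]
  rw [List.nil_append]
  set F := pvFresh infos [] with hF
  have hbody : (fun (out : List String) (t : String) =>
      let rows := (infos.filter (fun p => p.1 == t)).map (fun p => PySem.Dict.ofList p.2)
      ((out ++ ["Index," ++ PySem.Str.join "," (rows.headD (PySem.Dict.mk [])).keys ++ "\n"]) ++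
        (PySem.List.enumerate rows 1).map (fun ir =>
          PySem.Str.join ","
            (PySem.Int.toStr ir.1 :: ir.2.keys.map (fun k => ir.2.getD k "")) ++ "\n"))
      ++ ["\n"])
      = fun out t => out ++
          ((pvTitle ((pvRowsOf infos t).headD (PySem.Dict.mk []))) ::
            (pvRender (pvRowsOf infos t) ++ ["\n"])) := by
    funext out t
    simp [pvRowsOf, pvRender, pvLine, pvTitle]
  rw [hbody]
  rw [PySem.List.foldl_append_eq_flatMap
    (fun t => (pvTitle ((pvRowsOf infos t).headD (PySem.Dict.mk []))) ::
      (pvRender (pvRowsOf infos t) ++ ["\n"])) (pvKeys F) []]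
  rw [List.nil_append, pv_join_empty]
  rw [← pv_blocks_emit F]
  congr 1
  unfold pvKeys
  rw [List.flatMap_map]
  apply List.flatMap_congr  -- pointwise over membership
  intro e he
  obtain ⟨h1, h2, h3⟩ := pv_fresh_entry infos [] e (hF ▸ he)
  rw [← h1, ← h2]

-- ===== VERDICT (by name: the statement is the Claim_ definition above) =====
theorem get_CSV_spec : Claim_equal_get_CSV := by
  intro infos _
  unfold Spec_get_CSV
  apply pv_str_ext
  have h0 : (pvKeys ([] : List pvE)).Nodup := by simp [pvKeys]
  have hnd := pv_fold_nodup infos [] h0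
  have h1 : (get_CSV infos).toList = (pvFold infos []).flatMap pvEmit := by
    simp only [get_CSV]
    rw [show (PySem.Dict.mk [] : PySem.Dict String String) = pvTT [] from rfl]
    rw [show (PySem.Dict.mk [] : PySem.Dict String (List String)) = pvTC [] from rfl]
    rw [pv_foldA infos [] h0]
    have := pv_emitA (pvFold infos []) "" hnd
    simpa using this
  have h2 : pvFold infos [] = pvFresh infos [] := by
    have := pv_fold_char infos []
    simpa [pvKeys] using this
  rw [h1, h2, pv_emitB]
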